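-- pv_equiv track=rewrite | github.com/AndersSkov/ReadMapper | suffix_array.py | LMSsort
-- ===== SOURCE A (Python) =====
-- def isLeftMostSmallChar(offset, classes):
--     if offset == 0:
--         return False
--     if classes[offset] == ord("S") and classes[offset-1] == ord("L"):
--         return True
--     return False
--
-- def bucketTails(bucketSizes):
--     offset = 0
--     ret = []
--     for size in bucketSizes:
--         offset += int(size)
--         ret.append(offset)
--     return ret
--
-- def LMSsort(input, bucketSize, classes, letters):
--     # empty SA
--     SA = [-1] * (len(input))
--
--     tails = bucketTails(bucketSize)
--
--     # bucket sort the LMS approx into the buckets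
--     for i in range (len(input)):
--
--         # if not LMS, continue
--         if not isLeftMostSmallChar(i, classes):
--             continue
--         # find the index of the character in buckets
--         character = input[i]
--         index = letters.index(character)
--         # we now add the start position at the tail of the bucket, and move the tail pointer one down
--         SA[tails[index]] = i
--         tails[index] -= 1
--
--     SA.append(SA.pop(0))
--
--     return SA
-- ===== SOURCE B (Python) =====
-- def LMSsort(input, bucketSize, classes, letters):
--     n = len(input)
--     # index each letter by its bucket once (first occurrence wins),
--     # so no per-position scan of letters is needed
--     rank = {}
--     for j, c in enumerate(letters):
--         rank.setdefault(c, j)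
--     # group the LMS positions of input by the bucket of their first character
--     groups = {}
--     for i in range(1, n):
--         if classes[i] == ord("S") and classes[i - 1] == ord("L"):
--             groups.setdefault(rank[input[i]], []).append(i)
--     # write each bucket's LMS positions from the bucket's tail downwards
--     SA = [-1] * n
--     tail = 0
--     for k, size in enumerate(bucketSize):
--         tail += int(size)
--         for off, i in enumerate(groups.get(k, [])):
--             SA[tail - off] = i
--     # the suffix array is reported rotated one step to the left
--     return SA[1:] + SA[:1]
-- ===== Notes on version B (the rewrite author's own statement) =====
-- stated objective: alternative
-- what changed: B replaces A's single interleaved pass (mutable tails array, letters.index scan per LMS position, pop/append rotation) by three phases: a letter-to-bucket dict built once replaces the inner letters.index scan, LMS positions are grouped per bucket in lists, and one walk over the buckets writes each group downward from a running tail, returning the rotation by slicing; Pre_ excludes inputs where two LMS writes target the same SA cell, on which the surviving entry is an accident of write order (A keeps the write with the larger position, B the one from the later bucket).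
import Mathlib
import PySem

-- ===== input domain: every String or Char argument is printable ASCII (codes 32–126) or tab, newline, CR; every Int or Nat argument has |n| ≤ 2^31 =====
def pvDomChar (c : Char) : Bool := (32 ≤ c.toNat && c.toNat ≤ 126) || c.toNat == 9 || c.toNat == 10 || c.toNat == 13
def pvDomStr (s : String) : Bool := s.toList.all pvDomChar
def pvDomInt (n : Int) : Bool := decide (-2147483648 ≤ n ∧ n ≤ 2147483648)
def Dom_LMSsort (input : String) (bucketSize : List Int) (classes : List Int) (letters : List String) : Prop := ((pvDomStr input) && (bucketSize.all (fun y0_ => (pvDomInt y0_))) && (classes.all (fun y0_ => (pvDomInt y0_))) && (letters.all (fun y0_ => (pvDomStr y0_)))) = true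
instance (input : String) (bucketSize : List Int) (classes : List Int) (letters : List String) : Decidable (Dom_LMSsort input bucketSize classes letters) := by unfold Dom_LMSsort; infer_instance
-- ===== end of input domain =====

-- B replaces A's interleaved bucket-tail pass by three phases (a letter-to-bucket dict built
-- once instead of the per-position letters.index scan, per-bucket grouping of the LMS
-- positions, one walk over the buckets writing each group downward from a running tail) and
-- returns the rotation by slicing (objective: alternative decomposition).

-- ===== PORT A =====
def pvIsLMS_A (offset : Int) (classes : List Int) : Bool :=
  if offset = 0 then false
  else if PySem.List.pyGetD classes offset 0 == 83 && PySem.List.pyGetD classes (offset - 1) 0 == 76 then true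
  else false

def pvBucketTails (bucketSizes : List Int) : List Int :=
  (bucketSizes.foldl (fun (st : Int × List Int) size => (st.1 + size, st.2 ++ [st.1 + size])) (0, [])).2

def pvStepA (cs : List Char) (classes : List Int) (letters : List String)
    (st : List Int × List Int) (i : Int) : List Int × List Int :=
  if !(pvIsLMS_A i classes) then st
  else
    let character := PySem.List.pyGetD cs i ' '
    let index := ((PySem.List.index? letters (String.ofList [character])).getD 0 : Nat)
    (PySem.List.pySetD st.1 (PySem.List.pyGetD st.2 (index : Int) 0) i,
     PySem.List.pySetD st.2 (index : Int) (PySem.List.pyGetD st.2 (index : Int) 0 - 1))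

def LMSsort (input : String) (bucketSize : List Int) (classes : List Int) (letters : List String) : List Int :=
  let cs := input.toList
  let SA0 : List Int := List.replicate cs.length (-1)
  let st := (PySem.List.pyRange 0 (cs.length : Int) 1).foldl (pvStepA cs classes letters) (SA0, pvBucketTails bucketSize)
  match PySem.List.pop? st.1 0 with
  | some p => p.2 ++ [p.1]
  | none => st.1

-- ===== PORT B =====
def pvRank (letters : List String) : PySem.Dict String Int :=
  (PySem.List.enumerate letters 0).foldl (fun r jc => r.setdefault jc.2 jc.1) PySem.Dict.empty

def pvGroupStepB (cs : List Char) (classes : List Int) (rank : PySem.Dict String Int)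
    (g : PySem.Dict Int (List Int)) (i : Int) : PySem.Dict Int (List Int) :=
  if PySem.List.pyGetD classes i 0 == 83 && PySem.List.pyGetD classes (i - 1) 0 == 76 then
    let k := rank.getD (String.ofList [PySem.List.pyGetD cs i ' ']) 0
    g.insert k (g.getD k [] ++ [i])
  else g

def pvWriteBuckets (g : PySem.Dict Int (List Int)) (bucketSize : List Int) (SA0 : List Int) :
    List Int × Int :=
  (PySem.List.enumerate bucketSize 0).foldl
    (fun (st : List Int × Int) ks =>
      let tail := st.2 + ks.2
      ((PySem.List.enumerate (g.getD ks.1 []) 0).foldl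
          (fun sa oi => PySem.List.pySetD sa (tail - oi.1) oi.2) st.1,
       tail))
    (SA0, 0)

def LMSsort_alt (input : String) (bucketSize : List Int) (classes : List Int) (letters : List String) : List Int :=
  let cs := input.toList
  let rank := pvRank letters
  let g := (PySem.List.pyRange 1 (cs.length : Int) 1).foldl (pvGroupStepB cs classes rank) PySem.Dict.empty
  let st := pvWriteBuckets g bucketSize (List.replicate cs.length (-1))
  PySem.List.slice st.1 (some 1) none ++ PySem.List.slice st.1 none (some 1)

-- ===== PRECONDITION & SPEC =====
-- closed-form helpers for Pre_ (independent of the ports)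
def pvLMSb (classes : List Int) (i : Nat) : Bool :=
  decide (1 ≤ i) && (classes.getD i 0 == 83) && (classes.getD (i - 1) 0 == 76)

def pvBkt (cs : List Char) (letters : List String) (i : Nat) : Nat :=
  letters.idxOf (String.ofList [cs.getD i ' '])

def pvPrev (cs : List Char) (classes : List Int) (letters : List String) (i : Nat) : Nat :=
  (List.range i).countP (fun j => pvLMSb classes j && (pvBkt cs letters j == pvBkt cs letters i))

def pvTailAt (bucketSize : List Int) (k : Nat) : Int := (bucketSize.take (k + 1)).sum

-- the SA cell (as Python writes it, before negative-index normalisation) of LMS position i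
def pvCellI (cs : List Char) (bucketSize : List Int) (classes : List Int) (letters : List String) (i : Nat) : Int :=
  pvTailAt bucketSize (pvBkt cs letters i) - pvPrev cs classes letters i

-- Pre_ excludes the inputs on which A raises (empty input, classes shorter than the input,
-- an LMS character absent from letters, a bucket index beyond bucketSize, a write position
-- outside [-n, n)) and, in addition, inputs where two LMS writes land in the same SA cell:
-- there the surviving entry is an accident of write order (A keeps the write with the larger
-- position, B the one from the later bucket).
def Pre_LMSsort (input : String) (bucketSize : List Int) (classes : List Int) (letters : List String) : Prop :=
  0 < input.toList.length ∧
  (1 < input.toList.length → input.toList.length ≤ classes.length) ∧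
  (∀ i < input.toList.length, pvLMSb classes i = true →
    String.ofList [input.toList.getD i ' '] ∈ letters ∧
    pvBkt input.toList letters i < bucketSize.length ∧
    -(input.toList.length : Int) ≤ pvCellI input.toList bucketSize classes letters i ∧
    pvCellI input.toList bucketSize classes letters i < (input.toList.length : Int)) ∧
  (∀ i < input.toList.length, ∀ j < i, pvLMSb classes i = true → pvLMSb classes j = true →
    pvCellI input.toList bucketSize classes letters i % (input.toList.length : Int)
      ≠ pvCellI input.toList bucketSize classes letters j % (input.toList.length : Int))
instance (input : String) (bucketSize : List Int) (classes : List Int) (letters : List String) : Decidable (Pre_LMSsort input bucketSize classes letters) := by unfold Pre_LMSsort; infer_instance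

def pvWitness_LMSsort : String × List Int × List Int × List String := ("ab", [1, 0], [76, 83], ["a", "b"])

def Spec_LMSsort (input : String) (bucketSize : List Int) (classes : List Int) (letters : List String) (out : List Int) : Prop := out = LMSsort_alt input bucketSize classes letters
instance (input : String) (bucketSize : List Int) (classes : List Int) (letters : List String) (out : List Int) : Decidable (Spec_LMSsort input bucketSize classes letters out) := by unfold Spec_LMSsort; infer_instance

-- ===== CLAIM (what is proved, stated in full; the proofs are below) =====
def Claim_equal_LMSsort : Prop := ∀ (input : String) (bucketSize : List Int) (classes : List Int) (letters : List String), Dom_LMSsort input bucketSize classes letters → Pre_LMSsort input bucketSize classes letters → Spec_LMSsort input bucketSize classes letters (LMSsort input bucketSize classes letters)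

-- ===== LEMMAS AND PROOFS =====

-- the normalised (Nat) SA cell of LMS position i
def pvCellN (cs : List Char) (bucketSize : List Int) (classes : List Int) (letters : List String) (i : Nat) : Nat :=
  ((pvCellI cs bucketSize classes letters i) % (cs.length : Int)).toNat

def pvCnt (cs : List Char) (classes : List Int) (letters : List String) (m k : Nat) : Int :=
  ((List.range m).countP (fun j => pvLMSb classes j && (pvBkt cs letters j == k)) : Int)

-- which value sits at cell p after A has processed the first m source positions
def pvGoodA (cs : List Char) (bucketSize : List Int) (classes : List Int) (letters : List String)
    (m p : Nat) (v : Int) : Prop :=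
  (v = -1 ∧ ∀ i, i < m → pvLMSb classes i = true → pvCellN cs bucketSize classes letters i ≠ p) ∨
  (∃ i, i < m ∧ pvLMSb classes i = true ∧ pvCellN cs bucketSize classes letters i = p ∧ v = (i : Int))

-- which value sits at cell p after B has written the buckets below t
def pvGoodB (cs : List Char) (bucketSize : List Int) (classes : List Int) (letters : List String)
    (t p : Nat) (v : Int) : Prop :=
  (v = -1 ∧ ∀ i, i < cs.length → pvLMSb classes i = true → pvBkt cs letters i < t →
      pvCellN cs bucketSize classes letters i ≠ p) ∨
  (∃ i, i < cs.length ∧ pvLMSb classes i = true ∧ pvBkt cs letters i < t ∧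
      pvCellN cs bucketSize classes letters i = p ∧ v = (i : Int))

def pvA (cs : List Char) (bucketSize : List Int) (classes : List Int) (letters : List String) (m : Nat) : List Int × List Int :=
  (PySem.List.pyRange 0 (m : Int) 1).foldl (pvStepA cs classes letters) (List.replicate cs.length (-1), pvBucketTails bucketSize)

def pvGB (cs : List Char) (classes : List Int) (letters : List String) (m : Nat) : PySem.Dict Int (List Int) :=
  (PySem.List.pyRange 1 (m : Int) 1).foldl (pvGroupStepB cs classes (pvRank letters)) PySem.Dict.empty

def pvGrpNat (cs : List Char) (classes : List Int) (letters : List String) (m k : Nat) : List Nat :=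
  (List.range m).filter (fun i => pvLMSb classes i && (pvBkt cs letters i == k))

theorem pvBucketTails_aux (bs : List Int) (a : Int) (acc : List Int) :
    (bs.foldl (fun (st : Int × List Int) size => (st.1 + size, st.2 ++ [st.1 + size])) (a, acc)).2
      = acc ++ (List.range bs.length).map (fun k => a + (bs.take (k + 1)).sum) := by
  induction bs generalizing a acc with
  | nil => simp
  | cons s bs ih =>
    simp only [List.foldl_cons, ih]
    simp [List.range_succ_eq_map, List.map_map, Function.comp]
    intro k hk; ring

theorem pvBucketTails_eq (bs : List Int) :
    pvBucketTails bs = (List.range bs.length).map (fun k => (bs.take (k + 1)).sum) := by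
  rw [pvBucketTails, pvBucketTails_aux]; simp

theorem pvBucketTails_len (bs : List Int) : (pvBucketTails bs).length = bs.length := by
  simp [pvBucketTails_eq]

theorem pvBucketTails_getD (bs : List Int) (k : Nat) (hk : k < bs.length) :
    (pvBucketTails bs).getD k 0 = pvTailAt bs k := by
  simp [pvBucketTails_eq, List.getD, pvTailAt, hk]

theorem pvIndex_getD (letters : List String) (s : String) (h : s ∈ letters) :
    (PySem.List.index? letters s).getD 0 = letters.idxOf s := by
  rw [PySem.List.index?_eq_idxOf?]
  obtain ⟨v, hv⟩ := Option.isSome_iff_exists.mp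
    ((PySem.List.index?_eq_idxOf? letters s ▸ PySem.List.index?_isSome_iff letters s).mpr h)
  rw [hv, List.idxOf_eq_getD_idxOf?, hv]; rfl

theorem pvCnt_succ (cs : List Char) (classes : List Int) (letters : List String) (m k : Nat) :
    pvCnt cs classes letters (m + 1) k
      = pvCnt cs classes letters m k + (if pvLMSb classes m && (pvBkt cs letters m == k) then 1 else 0) := by
  by_cases h : (pvLMSb classes m && (pvBkt cs letters m == k)) = true <;>
    simp [pvCnt, List.range_succ, List.countP_append, h]

theorem pvA_zero (cs : List Char) (bucketSize classes : List Int) (letters : List String) :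
    pvA cs bucketSize classes letters 0 = (List.replicate cs.length (-1), pvBucketTails bucketSize) := by
  simp [pvA, PySem.List.pyRange_one_eq_nil (by omega : (0:Int) ≤ 0)]

theorem pvA_succ (cs : List Char) (bucketSize classes : List Int) (letters : List String) (m : Nat) :
    pvA cs bucketSize classes letters (m + 1)
      = pvStepA cs classes letters (pvA cs bucketSize classes letters m) (m : Int) := by
  have hc : ((m + 1 : Nat) : Int) = (m : Int) + 1 := by push_cast; ring
  rw [pvA, hc, PySem.List.pyRange_one_succ_right (by positivity : (0:Int) ≤ (m:Int)), List.foldl_append]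
  rfl

theorem pvGB_zero (cs : List Char) (classes : List Int) (letters : List String) :
    pvGB cs classes letters 0 = PySem.Dict.empty := by
  simp [pvGB, PySem.List.pyRange_one_eq_nil (by omega : (0:Int) ≤ 1)]

theorem pvGB_one (cs : List Char) (classes : List Int) (letters : List String) :
    pvGB cs classes letters 1 = PySem.Dict.empty := by
  simp [pvGB, PySem.List.pyRange_one_eq_nil (by omega : (1:Int) ≤ 1)]

theorem pvGB_succ (cs : List Char) (classes : List Int) (letters : List String) (m : Nat) (hm : 1 ≤ m) :
    pvGB cs classes letters (m + 1)
      = pvGroupStepB cs classes (pvRank letters) (pvGB cs classes letters m) (m : Int) := by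
  have hc : ((m + 1 : Nat) : Int) = (m : Int) + 1 := by push_cast; ring
  rw [pvGB, hc, PySem.List.pyRange_one_succ_right (by exact_mod_cast hm), List.foldl_append]
  rfl

-- Python negative-index normalisation of a write in range [-n, n)
theorem pvSetD_norm (xs : List Int) (t v : Int) (h0 : 0 < xs.length)
    (h1 : -(xs.length : Int) ≤ t) (h2 : t < (xs.length : Int)) :
    PySem.List.pySetD xs t v = xs.set (t % (xs.length : Int)).toNat v := by
  rcases Int.lt_or_le t 0 with hneg | hpos
  · show (PySem.List.pySet? _ t _).getD _ = _
    rw [PySem.List.pySet?]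
    simp only [PySem.List.pyIdx?, if_neg (by omega : ¬ (0:Int) ≤ t), if_pos h1]
    simp only [Option.map_some, Option.getD_some]
    congr 1
    have : t % (xs.length : Int) = t + xs.length := by
      have hadd : (t + (xs.length : Int) * 1) % (xs.length : Int) = t % xs.length :=
        Int.add_mul_emod_self_left t (xs.length : Int) 1
      simp only [mul_one] at hadd
      rw [← hadd, Int.emod_eq_of_lt (by omega) (by omega)]
    omega
  · rw [PySem.List.pySetD_of_nonneg _ _ hpos, Int.emod_eq_of_lt hpos h2]

theorem pvRank_get? (letters : List String) (j0 : Int) (r : PySem.Dict String Int) (s : String) :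
    ((PySem.List.enumerate letters j0).foldl (fun r jc => r.setdefault jc.2 jc.1) r).get? s
      = match r.get? s with
        | some v => some v
        | none => if s ∈ letters then some (j0 + (letters.idxOf s : Int)) else none := by
  induction letters generalizing j0 r with
  | nil => cases h : r.get? s <;> simp [PySem.List.enumerate_nil, h]
  | cons c cs ih =>
    rw [PySem.List.enumerate_cons, List.foldl_cons, ih]
    by_cases hcs : c = s
    · subst hcs
      rw [PySem.Dict.get?_setdefault_self]
      cases h : r.get? c <;> simp [List.idxOf_cons_self]
    · rw [PySem.Dict.get?_setdefault_of_ne _ _ (fun h => hcs h.symm)]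
      cases h : r.get? s
      · simp only
        by_cases hm : s ∈ cs
        · rw [if_pos hm, if_pos (List.mem_cons_of_mem _ hm),
              List.idxOf_cons_ne _ hcs]
          congr 1
          push_cast [Nat.succ_eq_add_one]
          ring
        · rw [if_neg hm, if_neg (by
            simp only [List.mem_cons, not_or]
            exact ⟨fun h => hcs h.symm, hm⟩)]
      · simp

theorem pvRank_getD (letters : List String) (s : String) (h : s ∈ letters) :
    (pvRank letters).getD s 0 = (letters.idxOf s : Int) := by
  have hh : (pvRank letters).get? s = some ((0:Int) + (letters.idxOf s : Int)) := by
    rw [pvRank, pvRank_get?]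
    simp [PySem.Dict.get?_empty, h]
  simp [PySem.Dict.getD, hh]

-- position in a filter of a range = count of earlier matches
theorem pvFilterRangePos (n : Nat) (q : Nat → Bool) (j : Nat)
    (h : j < ((List.range n).filter q).length) :
    (List.range (((List.range n).filter q)[j])).countP q = j ∧
    ((List.range n).filter q)[j] < n ∧ q (((List.range n).filter q)[j]) = true := by
  induction n with
  | zero => simp at h
  | succ n ih =>
    simp only [List.range_succ, List.filter_append] at h ⊢
    by_cases hj : j < ((List.range n).filter q).length
    · rw [List.getElem_append_left hj]
      obtain ⟨h1, h2, h3⟩ := ih hj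
      exact ⟨h1, by omega, h3⟩
    · rcases hqn : q n with _ | _
      · exfalso
        have hnil : List.filter q [n] = [] := by simp [hqn]
        rw [hnil, List.append_nil] at h
        exact hj h
      · have hfil : List.filter q [n] = [n] := by simp [hqn]
        simp only [hfil] at h ⊢
        have hj' : j = ((List.range n).filter q).length := by
          rw [List.length_append] at h; simp at h; omega
        rw [List.getElem_append_right (by omega)]
        have he : [n][j - ((List.range n).filter q).length]'(by simp; omega) = n := by
          simp [hj']
        rw [he]
        exact ⟨by rw [List.countP_eq_length_filter, hj'], by omega, hqn⟩

theorem pvSetFold_len (ws : List (Nat × Int)) (SA : List Int) :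
    (ws.foldl (fun sa (w : Nat × Int) => sa.set w.1 w.2) SA).length = SA.length := by
  induction ws generalizing SA with
  | nil => rfl
  | cons w ws ih => simp [List.foldl_cons, ih]

theorem pvSetFold_miss (ws : List (Nat × Int)) (SA : List Int) (p : Nat)
    (h : ∀ w ∈ ws, w.1 ≠ p) :
    (ws.foldl (fun sa (w : Nat × Int) => sa.set w.1 w.2) SA).getD p (-1) = SA.getD p (-1) := by
  induction ws generalizing SA with
  | nil => rfl
  | cons w ws ih =>
    rw [List.foldl_cons, ih _ (fun w' hw' => h w' (by simp [hw']))]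
    rw [List.getD, List.getD, List.getElem?_set, if_neg (h w (by simp))]

theorem pvSetFold_hit (ws : List (Nat × Int)) (SA : List Int) (p : Nat) (v0 : Int)
    (hp : p < SA.length)
    (hv : ∀ w ∈ ws, w.1 = p → w.2 = v0) (hex : ∃ w ∈ ws, w.1 = p) :
    (ws.foldl (fun sa (w : Nat × Int) => sa.set w.1 w.2) SA).getD p (-1) = v0 := by
  induction ws generalizing SA with
  | nil => obtain ⟨w, hw, _⟩ := hex; exact absurd hw (List.not_mem_nil)
  | cons w ws ih =>
    rw [List.foldl_cons]
    by_cases hex' : ∃ w' ∈ ws, w'.1 = p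
    · exact ih _ (by simpa using hp) (fun w' hw' => hv w' (by simp [hw'])) hex'
    · have hw1 : w.1 = p := by
        obtain ⟨w', hw', he⟩ := hex
        rcases List.mem_cons.mp hw' with h | h
        · exact h ▸ he
        · exact absurd ⟨w', h, he⟩ hex'
      rw [pvSetFold_miss _ _ _ (fun w' hw' hc => hex' ⟨w', hw', hc⟩)]
      rw [List.getD, List.getElem?_set, if_pos hw1, if_pos (hw1 ▸ hp)]
      simp [hv w (by simp) hw1]

-- the port's loop condition agrees with pvLMSb for an in-range source index
theorem pvCond_eq (classes : List Int) (m : Nat) (hm1 : 1 ≤ m) :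
    (PySem.List.pyGetD classes (m : Int) 0 == 83 && PySem.List.pyGetD classes ((m : Int) - 1) 0 == 76)
      = pvLMSb classes m := by
  have hcast : ((m : Int) - 1) = ((m - 1 : Nat) : Int) := by omega
  have hgm : PySem.List.pyGetD classes (m : Int) 0 = classes.getD m 0 := by simp
  have hgm1 : PySem.List.pyGetD classes ((m : Int) - 1) 0 = classes.getD (m - 1) 0 := by
    rw [hcast]; simp
  rw [pvLMSb, hgm, hgm1]
  have hdec : decide (1 ≤ m) = true := decide_eq_true hm1
  rw [hdec, Bool.true_and]

theorem pvIsLMS_A_eq (classes : List Int) (m : Nat) (hm1 : 1 ≤ m) :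
    pvIsLMS_A (m : Int) classes = pvLMSb classes m := by
  rw [pvIsLMS_A, if_neg (by omega : ¬ (m : Int) = 0), ← pvCond_eq classes m hm1]
  rcases (PySem.List.pyGetD classes (m : Int) 0 == 83 && PySem.List.pyGetD classes ((m : Int) - 1) 0 == 76) <;> simp

theorem pvLMSb_zero (classes : List Int) : pvLMSb classes 0 = false := by
  simp [pvLMSb]

-- uniqueness of the normalised cells (from the Pre_ distinctness clause)
theorem pvUniq (cs : List Char) (bucketSize classes : List Int) (letters : List String)
    (h0 : 0 < cs.length)
    (hPre4 : ∀ i < cs.length, ∀ j < i, pvLMSb classes i = true → pvLMSb classes j = true →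
      pvCellI cs bucketSize classes letters i % (cs.length : Int)
        ≠ pvCellI cs bucketSize classes letters j % (cs.length : Int))
    (i j : Nat) (hi : i < cs.length) (hj : j < cs.length)
    (hLi : pvLMSb classes i = true) (hLj : pvLMSb classes j = true)
    (hc : pvCellN cs bucketSize classes letters i = pvCellN cs bucketSize classes letters j) :
    i = j := by
  have hn : (cs.length : Int) ≠ 0 := by exact_mod_cast Nat.pos_iff_ne_zero.mp h0
  have hmod : pvCellI cs bucketSize classes letters i % (cs.length : Int)
      = pvCellI cs bucketSize classes letters j % (cs.length : Int) := by
    have h1 := Int.emod_nonneg (pvCellI cs bucketSize classes letters i) hn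
    have h2 := Int.emod_nonneg (pvCellI cs bucketSize classes letters j) hn
    unfold pvCellN at hc
    omega
  by_contra hne
  rcases Nat.lt_or_ge i j with h | h
  · exact hPre4 j hj i h hLj hLi hmod.symm
  · exact hPre4 i hi j (by omega) hLi hLj hmod

-- A's loop invariant: SA length, the moving tails, and the cell contents
theorem pvCellN_lt (cs : List Char) (bucketSize classes : List Int) (letters : List String)
    (i : Nat) (h0 : 0 < cs.length) :
    pvCellN cs bucketSize classes letters i < cs.length := by
  have hn : (0:Int) < (cs.length : Int) := by exact_mod_cast h0
  have ha := Int.emod_lt_of_pos (pvCellI cs bucketSize classes letters i) hn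
  have hb := Int.emod_nonneg (pvCellI cs bucketSize classes letters i) (by omega : (cs.length : Int) ≠ 0)
  unfold pvCellN
  omega

theorem pvInvA (cs : List Char) (bucketSize classes : List Int) (letters : List String)
    (hPre3 : ∀ i < cs.length, pvLMSb classes i = true →
      String.ofList [cs.getD i ' '] ∈ letters ∧
      pvBkt cs letters i < bucketSize.length ∧
      -(cs.length : Int) ≤ pvCellI cs bucketSize classes letters i ∧
      pvCellI cs bucketSize classes letters i < (cs.length : Int))
    (m : Nat) (hm : m ≤ cs.length) :
    (pvA cs bucketSize classes letters m).1.length = cs.length ∧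
    (pvA cs bucketSize classes letters m).2.length = bucketSize.length ∧
    (∀ k < bucketSize.length,
      (pvA cs bucketSize classes letters m).2.getD k 0
        = pvTailAt bucketSize k - pvCnt cs classes letters m k) ∧
    (∀ p < cs.length, pvGoodA cs bucketSize classes letters m p
        ((pvA cs bucketSize classes letters m).1.getD p (-1))) := by
  induction m with
  | zero =>
    rw [pvA_zero]
    refine ⟨by simp, pvBucketTails_len bucketSize, ?_, ?_⟩
    · intro k hk
      have := pvBucketTails_getD bucketSize k hk
      simp only [List.getD] at this
      simp [this, pvCnt]
    · intro p hp
      left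
      exact ⟨by simp [List.getD, hp], fun i hi => by omega⟩
  | succ m ih =>
    obtain ⟨h1, h2, h3, h4⟩ := ih (by omega)
    have hmn : m < cs.length := by omega
    rw [pvA_succ]
    rcases Nat.eq_zero_or_pos m with hm0 | hm1
    · subst hm0
      have hA0 : pvStepA cs classes letters (pvA cs bucketSize classes letters 0) 0
          = pvA cs bucketSize classes letters 0 := by
        simp [pvStepA, pvIsLMS_A]
      have hc0 : ∀ k, pvCnt cs classes letters 1 k = pvCnt cs classes letters 0 k := by
        intro k; rw [pvCnt_succ]; simp [pvLMSb]
      rw [Nat.cast_zero, hA0]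
      refine ⟨h1, h2, fun k hk => by rw [hc0]; exact h3 k hk, ?_⟩
      intro p hp
      rcases h4 p hp with ⟨hv, hall⟩ | ⟨i, hi, _⟩
      · exact Or.inl ⟨hv, fun i hi hL => by
          interval_cases i
          rw [pvLMSb_zero] at hL; exact absurd hL (by simp)⟩
      · omega
    · have hAcond : pvIsLMS_A (m : Int) classes = pvLMSb classes m := pvIsLMS_A_eq classes m hm1
      by_cases hb : pvLMSb classes m = true
      · obtain ⟨hmem, hkb, hlo, hhi⟩ := hPre3 m hmn hb
        set s := String.ofList [cs.getD m ' '] with hs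
        set kk := pvBkt cs letters m with hkk
        have hchar : PySem.List.pyGetD cs (m : Int) ' ' = cs.getD m ' ' := by simp
        have hidx : ((PySem.List.index? letters s).getD 0 : Nat) = kk := by
          rw [pvIndex_getD letters s hmem]; rfl
        have hprev : (pvPrev cs classes letters m : Int) = pvCnt cs classes letters m kk := rfl
        have htailsA : PySem.List.pyGetD (pvA cs bucketSize classes letters m).2 (kk : Int) 0
            = pvCellI cs bucketSize classes letters m := by
          rw [PySem.List.pyGetD_natCast]
          show (pvA cs bucketSize classes letters m).2.getD kk 0 = _
          rw [h3 kk hkb, pvCellI, ← hkk, hprev]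
        set t : Int := pvCellI cs bucketSize classes letters m with ht
        have h0' : 0 < (pvA cs bucketSize classes letters m).1.length := by omega
        have hset : PySem.List.pySetD (pvA cs bucketSize classes letters m).1 t (m : Int)
            = (pvA cs bucketSize classes letters m).1.set (pvCellN cs bucketSize classes letters m) (m : Int) := by
          rw [pvSetD_norm _ _ _ h0' (by rw [h1]; exact hlo) (by rw [h1]; exact hhi)]
          rw [h1]
          rfl
        have hAstep : pvStepA cs classes letters (pvA cs bucketSize classes letters m) (m : Int)
            = ((pvA cs bucketSize classes letters m).1.set (pvCellN cs bucketSize classes letters m) (m : Int),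
               PySem.List.pySetD (pvA cs bucketSize classes letters m).2 (kk : Int) (t - 1)) := by
          rw [pvStepA, hAcond, hb]
          simp only [Bool.not_true, Bool.false_eq_true, if_false, hchar]
          rw [hidx, htailsA, hset]
        rw [hAstep]
        have hcnt_kk : pvCnt cs classes letters (m + 1) kk = pvCnt cs classes letters m kk + 1 := by
          rw [pvCnt_succ]; simp [hb, hkk]
        have hcnt_ne : ∀ k : Nat, k ≠ kk → pvCnt cs classes letters (m + 1) k = pvCnt cs classes letters m k := by
          intro k hk; rw [pvCnt_succ]
          have hne : (pvBkt cs letters m == k) = false := by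
            rw [← hkk]; simp only [beq_eq_false_iff_ne, ne_eq]; omega
          simp [hne]
        refine ⟨by simpa using h1, ?_, ?_, ?_⟩
        · rw [PySem.List.pySetD_natCast, List.length_set]; exact h2
        · intro k hk
          rw [PySem.List.pySetD_natCast]
          by_cases hkeq : k = kk
          · subst hkeq
            rw [List.getD, List.getElem?_set, if_pos rfl, if_pos (h2 ▸ hkb)]
            have htval : t = pvTailAt bucketSize kk - pvCnt cs classes letters m kk := by
              rw [ht, pvCellI, ← hkk, hprev]
            rw [hcnt_kk]
            simp only [Option.getD_some]
            omega
          · rw [List.getD, List.getElem?_set, if_neg (fun h => hkeq h.symm), hcnt_ne k hkeq]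
            exact h3 k hk
        · intro p hp
          by_cases hpeq : p = pvCellN cs bucketSize classes letters m
          · subst hpeq
            rw [List.getD, List.getElem?_set, if_pos rfl,
                if_pos (h1 ▸ pvCellN_lt cs bucketSize classes letters m (by omega))]
            exact Or.inr ⟨m, by omega, hb, rfl, rfl⟩
          · rw [List.getD, List.getElem?_set, if_neg (fun h => hpeq h.symm)]
            rcases h4 p hp with ⟨hv, hall⟩ | ⟨i, hi, hL, hcell, hv⟩
            · exact Or.inl ⟨hv, fun i hi hL => by
                rcases Nat.lt_or_ge i m with h | h
                · exact hall i h hL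
                · have : i = m := by omega
                  subst this
                  exact fun hc => hpeq hc.symm⟩
            · exact Or.inr ⟨i, by omega, hL, hcell, hv⟩
      · have hb' : pvLMSb classes m = false := by simpa using hb
        have hA : pvStepA cs classes letters (pvA cs bucketSize classes letters m) (m : Int)
            = pvA cs bucketSize classes letters m := by
          rw [pvStepA, hAcond, hb']; simp
        have hc : ∀ k, pvCnt cs classes letters (m + 1) k = pvCnt cs classes letters m k := by
          intro k; rw [pvCnt_succ]; simp [hb']
        rw [hA]
        refine ⟨h1, h2, fun k hk => by rw [hc]; exact h3 k hk, ?_⟩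
        intro p hp
        rcases h4 p hp with ⟨hv, hall⟩ | ⟨i, hi, hL, hcell, hv⟩
        · exact Or.inl ⟨hv, fun i hi hL => by
            rcases Nat.lt_or_ge i m with h | h
            · exact hall i h hL
            · have : i = m := by omega
              subst this
              rw [hb'] at hL; exact absurd hL (by simp)⟩
        · exact Or.inr ⟨i, by omega, hL, hcell, hv⟩

-- B's grouping pass builds, for each bucket, the increasing list of its LMS positions
theorem pvInvG (cs : List Char) (classes : List Int) (letters : List String)
    (hmem : ∀ i < cs.length, pvLMSb classes i = true → String.ofList [cs.getD i ' '] ∈ letters)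
    (m : Nat) (hm : m ≤ cs.length) :
    ∀ k : Nat, (pvGB cs classes letters m).getD (k : Int) []
      = (pvGrpNat cs classes letters m k).map Int.ofNat := by
  induction m with
  | zero => intro k; rw [pvGB_zero]; simp [pvGrpNat, PySem.Dict.getD_empty]
  | succ m ih =>
    have ih' := fun hm' => ih hm'
    rcases Nat.eq_zero_or_pos m with hm0 | hm1
    · subst hm0; intro k
      rw [pvGB_one]
      simp [pvGrpNat, List.range_one, PySem.Dict.getD_empty, pvLMSb_zero]
    · have hmn : m < cs.length := by omega
      intro k
      rw [pvGB_succ cs classes letters m hm1, pvGroupStepB, pvCond_eq classes m hm1]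
      by_cases hb : pvLMSb classes m = true
      · rw [hb]
        simp only [if_true]
        have hchar : PySem.List.pyGetD cs (m : Int) ' ' = cs.getD m ' ' := by simp
        have hkey : (pvRank letters).getD (String.ofList [PySem.List.pyGetD cs (m : Int) ' ']) 0
            = (pvBkt cs letters m : Int) := by
          rw [hchar, pvRank_getD letters _ (hmem m hmn hb)]; rfl
        rw [hkey, PySem.Dict.getD_insert]
        by_cases hkeq : k = pvBkt cs letters m
        · subst hkeq
          rw [if_pos rfl, ih' (by omega) _, pvGrpNat, pvGrpNat,
              List.range_succ, List.filter_append, List.map_append]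
          congr 1
          simp [hb]
        · have hne : (pvBkt cs letters m == k) = false := by
            simp only [beq_eq_false_iff_ne, ne_eq]
            exact fun h => hkeq h.symm
          rw [if_neg (by exact_mod_cast hkeq), ih' (by omega) k, pvGrpNat, pvGrpNat,
              List.range_succ, List.filter_append]
          simp [hne]
      · rw [Bool.not_eq_true] at hb
        rw [hb]
        simp only [Bool.false_eq_true, if_false]
        rw [ih' (by omega) k, pvGrpNat, pvGrpNat, List.range_succ, List.filter_append]
        simp [hb]

theorem pvInnerBridge (n : Nat) (tail : Int) (ws : List (Int × Int)) (SA : List Int)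
    (hSA : SA.length = n) (h0 : 0 < n)
    (hb : ∀ w ∈ ws, -(n : Int) ≤ tail - w.1 ∧ tail - w.1 < (n : Int)) :
    ws.foldl (fun sa oi => PySem.List.pySetD sa (tail - oi.1) oi.2) SA
      = (ws.map (fun w => (((tail - w.1) % (n : Int)).toNat, w.2))).foldl
          (fun sa (w : Nat × Int) => sa.set w.1 w.2) SA := by
  induction ws generalizing SA with
  | nil => rfl
  | cons w ws ih =>
    rw [List.map_cons, List.foldl_cons, List.foldl_cons]
    have hw := hb w (by simp)
    have hstep : PySem.List.pySetD SA (tail - w.1) w.2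
        = SA.set (((tail - w.1) % (n : Int)).toNat) w.2 := by
      rw [pvSetD_norm SA (tail - w.1) w.2 (by omega) (by rw [hSA]; exact hw.1) (by rw [hSA]; exact hw.2)]
      rw [hSA]
    rw [hstep]
    exact ih _ (by rw [List.length_set]; exact hSA) (fun w' hw' => hb w' (by simp [hw']))
-- writing one bucket's group advances the pvGoodB threshold by one
theorem pvInner (cs : List Char) (bucketSize classes : List Int) (letters : List String) (t : Nat)
    (h0 : 0 < cs.length)
    (hPre3 : ∀ i < cs.length, pvLMSb classes i = true →
      String.ofList [cs.getD i ' '] ∈ letters ∧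
      pvBkt cs letters i < bucketSize.length ∧
      -(cs.length : Int) ≤ pvCellI cs bucketSize classes letters i ∧
      pvCellI cs bucketSize classes letters i < (cs.length : Int))
    (hU : ∀ i j, i < cs.length → j < cs.length → pvLMSb classes i = true → pvLMSb classes j = true →
      pvCellN cs bucketSize classes letters i = pvCellN cs bucketSize classes letters j → i = j)
    (SA : List Int) (hSA : SA.length = cs.length)
    (hgood : ∀ p < cs.length, pvGoodB cs bucketSize classes letters t p (SA.getD p (-1))) :
    ((PySem.List.enumerate ((pvGrpNat cs classes letters cs.length t).map Int.ofNat) 0).foldl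
        (fun sa oi => PySem.List.pySetD sa (pvTailAt bucketSize t - oi.1) oi.2) SA).length = cs.length ∧
    ∀ p < cs.length, pvGoodB cs bucketSize classes letters (t + 1) p
      (((PySem.List.enumerate ((pvGrpNat cs classes letters cs.length t).map Int.ofNat) 0).foldl
        (fun sa oi => PySem.List.pySetD sa (pvTailAt bucketSize t - oi.1) oi.2) SA).getD p (-1)) := by
  have hF1 : ∀ w ∈ PySem.List.enumerate ((pvGrpNat cs classes letters cs.length t).map Int.ofNat) 0,
      ∃ i, i < cs.length ∧ pvLMSb classes i = true ∧ pvBkt cs letters i = t ∧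
        w.2 = Int.ofNat i ∧ pvTailAt bucketSize t - w.1 = pvCellI cs bucketSize classes letters i := by
    intro w hw
    obtain ⟨k, hk, hwk⟩ := (PySem.List.mem_enumerate_iff _ 0 w).mp hw
    have hkG : k < (pvGrpNat cs classes letters cs.length t).length := by
      simpa using hk
    obtain ⟨hcnt, hlt, hqq⟩ := pvFilterRangePos cs.length
      (fun i => pvLMSb classes i && (pvBkt cs letters i == t)) k hkG
    set i := (pvGrpNat cs classes letters cs.length t)[k]'hkG with hi
    obtain ⟨hLMS, hbkt⟩ : pvLMSb classes i = true ∧ pvBkt cs letters i = t := by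
      simpa using hqq
    have hprev : pvPrev cs classes letters i = k := by
      unfold pvPrev
      simp only [hbkt]
      exact hcnt
    refine ⟨i, hlt, hLMS, hbkt, ?_, ?_⟩
    · rw [hwk]
      show ((pvGrpNat cs classes letters cs.length t).map Int.ofNat)[k]'hk = Int.ofNat i
      simp [hi]
    · rw [hwk]
      show pvTailAt bucketSize t - ((0:Int) + (k : Nat)) = _
      rw [pvCellI, hbkt, hprev]
      ring
  have hBnd : ∀ w ∈ PySem.List.enumerate ((pvGrpNat cs classes letters cs.length t).map Int.ofNat) 0,
      -(cs.length : Int) ≤ pvTailAt bucketSize t - w.1 ∧ pvTailAt bucketSize t - w.1 < (cs.length : Int) := by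
    intro w hw
    obtain ⟨i, hi, hLi, _, _, hc⟩ := hF1 w hw
    rw [hc]
    exact ⟨(hPre3 i hi hLi).2.2.1, (hPre3 i hi hLi).2.2.2⟩
  have hfold := pvInnerBridge cs.length (pvTailAt bucketSize t)
    (PySem.List.enumerate ((pvGrpNat cs classes letters cs.length t).map Int.ofNat) 0) SA hSA h0 hBnd
  have hWel : ∀ w' ∈ (PySem.List.enumerate ((pvGrpNat cs classes letters cs.length t).map Int.ofNat) 0).map
      (fun w => (((pvTailAt bucketSize t - w.1) % (cs.length : Int)).toNat, w.2)),
      ∃ i, i < cs.length ∧ pvLMSb classes i = true ∧ pvBkt cs letters i = t ∧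
        w' = (pvCellN cs bucketSize classes letters i, Int.ofNat i) := by
    intro w' hw'
    obtain ⟨w, hw, rfl⟩ := List.mem_map.mp hw'
    obtain ⟨i, hi, hLi, hbkt, hv, hc⟩ := hF1 w hw
    exact ⟨i, hi, hLi, hbkt, by rw [hc, hv]; rfl⟩
  have hWex : ∀ i, i < cs.length → pvLMSb classes i = true → pvBkt cs letters i = t →
      (pvCellN cs bucketSize classes letters i, Int.ofNat i)
        ∈ (PySem.List.enumerate ((pvGrpNat cs classes letters cs.length t).map Int.ofNat) 0).map
            (fun w => (((pvTailAt bucketSize t - w.1) % (cs.length : Int)).toNat, w.2)) := by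
    intro i hi hLi hbkt
    have hiG : i ∈ pvGrpNat cs classes letters cs.length t := by
      unfold pvGrpNat
      exact List.mem_filter.mpr ⟨List.mem_range.mpr hi, by simp [hLi, hbkt]⟩
    obtain ⟨k, hk, hGk⟩ := List.getElem_of_mem hiG
    obtain ⟨hcnt2, hlt2, hqq2⟩ := pvFilterRangePos cs.length
      (fun i => pvLMSb classes i && (pvBkt cs letters i == t)) k hk
    have hprev2 : pvPrev cs classes letters i = k := by
      unfold pvPrev
      simp only [hbkt]
      rw [← hGk]
      exact hcnt2
    have hkL : k < ((pvGrpNat cs classes letters cs.length t).map Int.ofNat).length := by simpa using hk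
    have hmemE : (((0:Int) + (k : Nat)), ((pvGrpNat cs classes letters cs.length t).map Int.ofNat)[k]'hkL)
        ∈ PySem.List.enumerate ((pvGrpNat cs classes letters cs.length t).map Int.ofNat) 0 :=
      (PySem.List.mem_enumerate_iff _ 0 _).mpr ⟨k, hkL, rfl⟩
    have h2 := List.mem_map_of_mem
      (f := fun w : Int × Int => (((pvTailAt bucketSize t - w.1) % (cs.length : Int)).toNat, w.2)) hmemE
    have h3 : ((pvTailAt bucketSize t - ((0:Int) + (k : Nat))) % (cs.length : Int)).toNat
        = pvCellN cs bucketSize classes letters i := by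
      have hc3 : pvTailAt bucketSize t - ((0:Int) + (k : Nat)) = pvCellI cs bucketSize classes letters i := by
        rw [pvCellI, hbkt, hprev2]
        ring
      rw [hc3]
      rfl
    have h4 : ((pvGrpNat cs classes letters cs.length t).map Int.ofNat)[k]'hkL = Int.ofNat i := by
      simp [hGk]
    simp only [h3, h4] at h2
    exact h2
  rw [hfold]
  refine ⟨by rw [pvSetFold_len]; exact hSA, ?_⟩
  intro p hp
  by_cases hC : ∃ i, i < cs.length ∧ pvLMSb classes i = true ∧ pvBkt cs letters i = t ∧
      pvCellN cs bucketSize classes letters i = p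
  · obtain ⟨i, hi, hLi, hbkt, hcell⟩ := hC
    have hhit := pvSetFold_hit _ SA p (Int.ofNat i) (by rw [hSA]; exact hp)
      (fun w' hw' hkey => by
        obtain ⟨i', hi', hLi', hbkt', rfl⟩ := hWel w' hw'
        have hk2 : pvCellN cs bucketSize classes letters i' = p := hkey
        have : i' = i := hU i' i hi' hi hLi' hLi (hk2.trans hcell.symm)
        rw [this])
      ⟨_, hcell ▸ hWex i hi hLi hbkt, rfl⟩
    rw [hhit]
    exact Or.inr ⟨i, hi, hLi, by omega, hcell, rfl⟩
  · have hmiss := pvSetFold_miss _ SA p (fun w' hw' hkey => by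
      obtain ⟨i', hi', hLi', hbkt', rfl⟩ := hWel w' hw'
      exact hC ⟨i', hi', hLi', hbkt', hkey⟩)
    rw [hmiss]
    rcases hgood p hp with ⟨hv, hall⟩ | ⟨i, hi, hLi, hbk, hcell, hv⟩
    · refine Or.inl ⟨hv, fun i hi hLi hbk => ?_⟩
      rcases Nat.lt_or_ge (pvBkt cs letters i) t with h | h
      · exact hall i hi hLi h
      · have hbt : pvBkt cs letters i = t := by omega
        exact fun hc => hC ⟨i, hi, hLi, hbt, hc⟩
    · exact Or.inr ⟨i, hi, hLi, by omega, hcell, hv⟩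

-- once every bucket an LMS suffix can live in is written, the threshold can be read as K
theorem pvGoodB_mono (cs : List Char) (bucketSize classes : List Int) (letters : List String)
    (hPre3 : ∀ i < cs.length, pvLMSb classes i = true →
      String.ofList [cs.getD i ' '] ∈ letters ∧
      pvBkt cs letters i < bucketSize.length ∧
      -(cs.length : Int) ≤ pvCellI cs bucketSize classes letters i ∧
      pvCellI cs bucketSize classes letters i < (cs.length : Int))
    (t p : Nat) (v : Int) (hK : bucketSize.length ≤ t)
    (h : pvGoodB cs bucketSize classes letters t p v) :
    pvGoodB cs bucketSize classes letters bucketSize.length p v := by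
  rcases h with ⟨hv, hall⟩ | ⟨i, hi, hLi, hbk, hcell, hv⟩
  · exact Or.inl ⟨hv, fun i hi hLi hbk => hall i hi hLi (by omega)⟩
  · exact Or.inr ⟨i, hi, hLi, (hPre3 i hi hLi).2.1, hcell, hv⟩

-- B's walk over the buckets, from any suffix of bucketSize onward
theorem pvOuter (cs : List Char) (bucketSize classes : List Int) (letters : List String)
    (g : PySem.Dict Int (List Int))
    (h0 : 0 < cs.length)
    (hPre3 : ∀ i < cs.length, pvLMSb classes i = true →
      String.ofList [cs.getD i ' '] ∈ letters ∧
      pvBkt cs letters i < bucketSize.length ∧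
      -(cs.length : Int) ≤ pvCellI cs bucketSize classes letters i ∧
      pvCellI cs bucketSize classes letters i < (cs.length : Int))
    (hU : ∀ i j, i < cs.length → j < cs.length → pvLMSb classes i = true → pvLMSb classes j = true →
      pvCellN cs bucketSize classes letters i = pvCellN cs bucketSize classes letters j → i = j)
    (hg : ∀ k : Nat, g.getD (k : Int) [] = (pvGrpNat cs classes letters cs.length k).map Int.ofNat) :
    ∀ (bs2 : List Int) (t : Nat) (SA : List Int),
    bucketSize.drop t = bs2 →
    SA.length = cs.length →
    (∀ p < cs.length, pvGoodB cs bucketSize classes letters t p (SA.getD p (-1))) →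
    ((PySem.List.enumerate bs2 (t : Int)).foldl
        (fun (st : List Int × Int) ks =>
          let tail := st.2 + ks.2
          ((PySem.List.enumerate (g.getD ks.1 []) 0).foldl
              (fun sa oi => PySem.List.pySetD sa (tail - oi.1) oi.2) st.1,
           tail))
        (SA, (bucketSize.take t).sum)).1.length = cs.length ∧
    ∀ p < cs.length, pvGoodB cs bucketSize classes letters bucketSize.length p
      (((PySem.List.enumerate bs2 (t : Int)).foldl
        (fun (st : List Int × Int) ks =>
          let tail := st.2 + ks.2
          ((PySem.List.enumerate (g.getD ks.1 []) 0).foldl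
              (fun sa oi => PySem.List.pySetD sa (tail - oi.1) oi.2) st.1,
           tail))
        (SA, (bucketSize.take t).sum)).1.getD p (-1)) := by
  intro bs2
  induction bs2 with
  | nil =>
    intro t SA hdrop hSA hgood
    rw [PySem.List.enumerate_nil, List.foldl_nil]
    have hK : bucketSize.length ≤ t := by
      have := congrArg List.length hdrop
      simp at this
      omega
    exact ⟨hSA, fun p hp => pvGoodB_mono cs bucketSize classes letters hPre3 t p _ hK (hgood p hp)⟩
  | cons size bs2 ih =>
    intro t SA hdrop hSA hgood
    have ht : t < bucketSize.length := by
      have := congrArg List.length hdrop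
      simp at this
      omega
    have hsize : bucketSize[t]'ht = size := by
      have : (bucketSize.drop t)[0]'(by rw [hdrop]; simp) = size := by
        simp only [hdrop]
        rfl
      rw [List.getElem_drop] at this
      simpa using this
    have htail : (bucketSize.take t).sum + size = pvTailAt bucketSize t := by
      rw [pvTailAt, List.sum_take_succ bucketSize t ht, hsize]
    rw [PySem.List.enumerate_cons, List.foldl_cons]
    simp only
    rw [htail, hg t]
    obtain ⟨hlen', hgood'⟩ := pvInner cs bucketSize classes letters t h0 hPre3 hU SA hSA hgood
    have hrec := ih (t + 1) _ (by rw [← List.drop_drop, hdrop]; rfl) hlen' hgood'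
    have hcast : ((t : Int) + 1) = ((t + 1 : Nat) : Int) := by push_cast; ring
    have htail2 : pvTailAt bucketSize t = (bucketSize.take (t + 1)).sum := rfl
    rw [hcast, htail2]
    exact hrec

-- a cell value pinned down by both invariants is the same value
theorem pvMatch (cs : List Char) (bucketSize classes : List Int) (letters : List String)
    (hPre3 : ∀ i < cs.length, pvLMSb classes i = true →
      String.ofList [cs.getD i ' '] ∈ letters ∧
      pvBkt cs letters i < bucketSize.length ∧
      -(cs.length : Int) ≤ pvCellI cs bucketSize classes letters i ∧
      pvCellI cs bucketSize classes letters i < (cs.length : Int))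
    (hU : ∀ i j, i < cs.length → j < cs.length → pvLMSb classes i = true → pvLMSb classes j = true →
      pvCellN cs bucketSize classes letters i = pvCellN cs bucketSize classes letters j → i = j)
    (p : Nat) (vA vB : Int)
    (hA : pvGoodA cs bucketSize classes letters cs.length p vA)
    (hB : pvGoodB cs bucketSize classes letters bucketSize.length p vB) :
    vA = vB := by
  rcases hA with ⟨hvA, hallA⟩ | ⟨i, hi, hLi, hci, hvA⟩ <;>
    rcases hB with ⟨hvB, hallB⟩ | ⟨j, hj, hLj, hbj, hcj, hvB⟩
  · rw [hvA, hvB]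
  · exact absurd hcj (hallA j hj hLj)
  · exact absurd hci (hallB i hi hLi (hPre3 i hi hLi).2.1)
  · rw [hvA, hvB, hU i j hi hj hLi hLj (hci.trans hcj.symm)]

theorem pvMain (input : String) (bucketSize : List Int) (classes : List Int) (letters : List String)
    (hPre : Pre_LMSsort input bucketSize classes letters) :
    LMSsort input bucketSize classes letters = LMSsort_alt input bucketSize classes letters := by
  obtain ⟨hn, hcl, hPre3', hPre4⟩ := hPre
  set cs := input.toList with hcs
  have hPre3 : ∀ i < cs.length, pvLMSb classes i = true →
      String.ofList [cs.getD i ' '] ∈ letters ∧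
      pvBkt cs letters i < bucketSize.length ∧
      -(cs.length : Int) ≤ pvCellI cs bucketSize classes letters i ∧
      pvCellI cs bucketSize classes letters i < (cs.length : Int) := hPre3'
  have hU := pvUniq cs bucketSize classes letters hn hPre4
  -- A's final array
  obtain ⟨hA1, _, _, hA4⟩ := pvInvA cs bucketSize classes letters hPre3 cs.length le_rfl
  -- B's final array
  have hg := pvInvG cs classes letters (fun i hi hL => (hPre3 i hi hL).1) cs.length le_rfl
  obtain ⟨hB1, hB4⟩ := pvOuter cs bucketSize classes letters
    (pvGB cs classes letters cs.length) hn hPre3 hU hg bucketSize 0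
    (List.replicate cs.length (-1)) (by rfl) (by simp)
    (fun p hp => Or.inl ⟨by simp [List.getD, hp], fun i hi hLi hbk => by omega⟩)
  -- the two final arrays coincide
  have hAB : (pvA cs bucketSize classes letters cs.length).1
      = ((PySem.List.enumerate bucketSize ((0 : Nat) : Int)).foldl
          (fun (st : List Int × Int) ks =>
            let tail := st.2 + ks.2
            ((PySem.List.enumerate ((pvGB cs classes letters cs.length).getD ks.1 []) 0).foldl
                (fun sa oi => PySem.List.pySetD sa (tail - oi.1) oi.2) st.1,
             tail))
          (List.replicate cs.length (-1), ((bucketSize.take 0).sum))).1 := by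
    apply List.ext_getElem (by rw [hA1, hB1])
    intro j hj hj2
    have hjn : j < cs.length := by omega
    have hgetA := hA4 j hjn
    have hgetB := hB4 j hjn
    rw [List.getD_eq_getElem _ _ hj] at hgetA
    rw [List.getD_eq_getElem _ _ hj2] at hgetB
    exact pvMatch cs bucketSize classes letters hPre3 hU j _ _ hgetA hgetB
  -- assemble both sides
  obtain ⟨a, rest, hSA⟩ : ∃ a rest, (pvA cs bucketSize classes letters cs.length).1 = a :: rest := by
    rcases hx : (pvA cs bucketSize classes letters cs.length).1 with _ | ⟨a, rest⟩
    · exfalso; rw [hx] at hA1; simp at hA1; omega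
    · exact ⟨a, rest, rfl⟩
  have hLeft : LMSsort input bucketSize classes letters = rest ++ [a] := by
    show (match PySem.List.pop? (pvA cs bucketSize classes letters cs.length).1 0 with
      | some p => p.2 ++ [p.1]
      | none => (pvA cs bucketSize classes letters cs.length).1) = rest ++ [a]
    rw [hSA, PySem.List.pop?_zero_cons]
  have hRight : LMSsort_alt input bucketSize classes letters = rest ++ [a] := by
    show PySem.List.slice (pvWriteBuckets (pvGB cs classes letters cs.length) bucketSize
          (List.replicate cs.length (-1))).1 (some 1) none
        ++ PySem.List.slice (pvWriteBuckets (pvGB cs classes letters cs.length) bucketSize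
          (List.replicate cs.length (-1))).1 none (some 1) = rest ++ [a]
    have hBS : (pvWriteBuckets (pvGB cs classes letters cs.length) bucketSize
        (List.replicate cs.length (-1))).1 = a :: rest := hAB.symm.trans hSA
    rw [hBS, PySem.List.slice_from_one, PySem.List.slice_to _ (by omega : (0:Int) ≤ 1)]
    simp
  rw [hLeft, hRight]

-- ===== VERDICT (by name: the statement is the Claim_ definition above) =====
theorem LMSsort_spec : Claim_equal_LMSsort := by
  intro input bucketSize classes letters _hDom hPre
  unfold Spec_LMSsort
  exact pvMain input bucketSize classes letters hPre
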